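-- pv_equiv track=rewrite | github.com/yuxin101/skills | skills/cy7533/financial-data-collection/FinancialDataCollection/src/fiscal_exporter.py | _build_merge_ranges
-- ===== SOURCE A (Python) =====
-- from typing import Dict, List, Sequence
--
-- def _build_merge_ranges(
--
--     rows: Sequence[Sequence[object]],
--     value_index: int,
--     group_index: int | None = None,
-- ) -> List[tuple[int, int, int]]:
--     ranges: List[tuple[int, int, int]] = []
--     start = 2
--     prev_value = rows[0][value_index]
--     prev_group = rows[0][group_index] if group_index is not None else None
--
--     for idx in range(1, len(rows) + 1):
--         value = rows[idx][value_index] if idx < len(rows) else None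
--         group = rows[idx][group_index] if group_index is not None and idx < len(rows) else None
--         if value == prev_value and (group_index is None or group == prev_group):
--             continue
--         end_row = idx + 1
--         if prev_value not in (None, "") and end_row - start > 0:
--             ranges.append((start, end_row, value_index + 1))
--         start = idx + 2
--         prev_value = value
--         prev_group = group
--     return ranges
-- ===== SOURCE B (Python) =====
-- def _build_merge_ranges(rows, value_index, group_index=None):
--     n = len(rows)
--     if group_index is None:
--         key = lambda i: rows[i][value_index]
--     else:
--         key = lambda i: (rows[i][value_index], rows[i][group_index])
--     # pass 1: every 0-based index where a new run of equal keys begins, plus the end sentinel n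
--     breaks = [i for i in range(n) if i == 0 or key(i) != key(i - 1)] + [n]
--     # pass 2: adjacent break pairs delimit the runs; keep the long, non-empty-valued ones
--     return [
--         (s + 2, e + 1, value_index + 1)
--         for s, e in zip(breaks, breaks[1:])
--         if e - s >= 2 and rows[s][value_index] not in (None, "")
--     ]
-- ===== Notes on version B (the rewrite author's own statement) =====
-- stated objective: alternative
-- what changed: B replaces A's stateful single pass (start/prev_value/prev_group accumulator plus a trailing None sentinel iteration) by two staged passes: first a list comprehension collects every 0-based index where the run key changes (plus the end sentinel n), then zip(breaks, breaks[1:]) pairs adjacent boundaries and emits (s+2, e+1, value_index+1) for pairs with e-s>=2 and a non-None/'' value.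
import Mathlib
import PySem

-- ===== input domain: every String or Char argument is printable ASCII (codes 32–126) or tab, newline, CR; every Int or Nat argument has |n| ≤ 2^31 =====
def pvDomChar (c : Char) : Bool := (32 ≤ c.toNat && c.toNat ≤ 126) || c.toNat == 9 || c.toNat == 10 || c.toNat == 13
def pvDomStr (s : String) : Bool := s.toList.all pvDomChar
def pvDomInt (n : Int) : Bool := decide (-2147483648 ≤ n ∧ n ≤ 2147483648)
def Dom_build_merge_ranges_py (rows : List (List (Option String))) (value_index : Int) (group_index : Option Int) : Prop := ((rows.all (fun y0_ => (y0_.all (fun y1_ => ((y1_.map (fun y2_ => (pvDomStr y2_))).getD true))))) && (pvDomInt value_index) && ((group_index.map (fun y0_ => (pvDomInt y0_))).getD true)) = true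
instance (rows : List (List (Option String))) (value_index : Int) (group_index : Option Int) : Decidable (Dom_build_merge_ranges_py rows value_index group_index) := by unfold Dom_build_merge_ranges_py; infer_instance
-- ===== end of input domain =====

-- B replaces A's stateful run-tracking pass (start/prev_value/prev_group + trailing None sentinel)
-- by two staged passes: collect all run-boundary indices first, then emit ranges from adjacent
-- boundary pairs (alternative decomposition; same cost).

-- ===== PORT A =====
-- rows[i][j] via Python indexing; the defaults are reached only outside Pre_ (where Python raises).
def pvCell (rows : List (List (Option String))) (i j : Int) : Option String :=
  (PySem.List.pyGet? ((PySem.List.pyGet? rows i).getD []) j).getD none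

def build_merge_ranges_py (rows : List (List (Option String))) (value_index : Int) (group_index : Option Int) : List (Int × Int × Int) :=
  let n : Int := (rows.length : Int)
  let prev_value := pvCell rows 0 value_index
  let prev_group : Option String :=
    match group_index with
    | some g => pvCell rows 0 g
    | none => none
  let st := (PySem.List.pyRange 1 (n + 1) 1).foldl
    (fun (s : List (Int × Int × Int) × Int × Option String × Option String) idx =>
      match s with
      | (ranges, start, pv, pg) =>
        let value := if idx < n then pvCell rows idx value_index else none
        let group : Option String :=
          match group_index with
          | some g => if idx < n then pvCell rows idx g else none
          | none => none
        if value = pv ∧ (group_index = none ∨ group = pg) then (ranges, start, pv, pg)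
        else
          let end_row := idx + 1
          let ranges' := if (¬ (pv = none ∨ pv = some "")) ∧ end_row - start > 0 then
              ranges ++ [(start, end_row, value_index + 1)] else ranges
          (ranges', idx + 2, value, group))
    ([], 2, prev_value, prev_group)
  st.1

-- ===== PORT B =====
-- key(r) from Source B: r[value_index] alone, or (r[value_index], r[group_index]); the scalar case is
-- encoded uniformly as a pair whose second slot is none (tuple equality = componentwise equality, exact).
def pvKeyB (value_index : Int) (group_index : Option Int) (r : List (Option String)) :
    Option String × Option (Option String) :=
  ((PySem.List.pyGet? r value_index).getD none,
   group_index.map (fun g => (PySem.List.pyGet? r g).getD none))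

-- key(i) from Source B; i comes from range(n) so rows[i] is the plain in-range access rows.getD i []
def pvKeyAt (rows : List (List (Option String))) (value_index : Int) (group_index : Option Int)
    (i : Nat) : Option String × Option (Option String) :=
  pvKeyB value_index group_index (rows.getD i [])

def build_merge_ranges_py_alt (rows : List (List (Option String))) (value_index : Int) (group_index : Option Int) : List (Int × Int × Int) :=
  let n := rows.length
  let key := pvKeyAt rows value_index group_index
  -- breaks = [i for i in range(n) if i == 0 or key(i) != key(i-1)] + [n]
  let breaks := ((List.range n).filter (fun i => i == 0 || decide (key i ≠ key (i - 1)))) ++ [n]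
  -- [(s+2, e+1, value_index+1) for s, e in zip(breaks, breaks[1:]) if e-s >= 2 and rows[s][value_index] not in (None, "")]
  (breaks.zip breaks.tail).flatMap (fun p =>
    let v := (PySem.List.pyGet? (rows.getD p.1 []) value_index).getD none
    if 2 ≤ p.2 - p.1 ∧ ¬ (v = none ∨ v = some "") then
      [((p.1 : Int) + 2, (p.2 : Int) + 1, value_index + 1)] else [])

-- ===== PRECONDITION & SPEC =====
-- Exactly where Python A returns: rows nonempty (A reads rows[0]) and every row access in range.
def Pre_build_merge_ranges_py (rows : List (List (Option String))) (value_index : Int) (group_index : Option Int) : Prop :=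
  rows ≠ [] ∧ ∀ r ∈ rows, PySem.Raise.InRange r.length value_index ∧
    ∀ g, group_index = some g → PySem.Raise.InRange r.length g
instance (rows : List (List (Option String))) (value_index : Int) (group_index : Option Int) : Decidable (Pre_build_merge_ranges_py rows value_index group_index) := by unfold Pre_build_merge_ranges_py; infer_instance

def pvWitness_build_merge_ranges_py : List (List (Option String)) × Int × Option Int :=
  ([[some "a", some "x"], [some "a", some "x"], [some "b", some "x"]], 0, some 1)

def Spec_build_merge_ranges_py (rows : List (List (Option String))) (value_index : Int) (group_index : Option Int) (out : List (Int × Int × Int)) : Prop := out = build_merge_ranges_py_alt rows value_index group_index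
instance (rows : List (List (Option String))) (value_index : Int) (group_index : Option Int) (out : List (Int × Int × Int)) : Decidable (Spec_build_merge_ranges_py rows value_index group_index out) := by unfold Spec_build_merge_ranges_py; infer_instance

-- ===== CLAIM (what is proved, stated in full; the proofs are below) =====
def Claim_equal_build_merge_ranges_py : Prop := ∀ (rows : List (List (Option String))) (value_index : Int) (group_index : Option Int), Dom_build_merge_ranges_py rows value_index group_index → Pre_build_merge_ranges_py rows value_index group_index → Spec_build_merge_ranges_py rows value_index group_index (build_merge_ranges_py rows value_index group_index)


-- ===== LEMMAS AND PROOFS =====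

-- packed loop state of A: (prev_value, prev_group) as one key
def pvPack (group_index : Option Int) (pv pg : Option String) : Option String × Option (Option String) :=
  (pv, group_index.map (fun _ => pg))

-- the key A's trailing sentinel iteration (idx = len(rows)) compares with
def pvSentK (group_index : Option Int) : Option String × Option (Option String) :=
  (none, group_index.map (fun _ => none))

-- A's loop body, re-expressed as one step over the key of the consumed row (idx = index being consumed)
def pvStep (value_index : Int)
    (s : List (Int × Int × Int) × Int × (Option String × Option (Option String)) × Int)
    (k : Option String × Option (Option String)) :
    List (Int × Int × Int) × Int × (Option String × Option (Option String)) × Int :=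
  match s with
  | (ranges, start, pk, idx) =>
    if k = pk then (ranges, start, pk, idx + 1)
    else
      let ranges' := if (¬ (pk.1 = none ∨ pk.1 = some "")) ∧ idx + 1 - start > 0 then
          ranges ++ [(start, idx + 1, value_index + 1)] else ranges
      (ranges', idx + 2, k, idx + 1)

-- reference emitter: current run started at 0-based row f and has cnt elements of key pk so far
def pvEmitFrom (value_index : Int) :
    Int → Nat → (Option String × Option (Option String)) →
    List (Option String × Option (Option String)) → List (Int × Int × Int)
  | f, cnt, pk, [] =>
    if 2 ≤ cnt ∧ ¬ (pk.1 = none ∨ pk.1 = some "") then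
      [(f + 2, f + (cnt : Int) + 1, value_index + 1)] else []
  | f, cnt, pk, k :: ks =>
    if k = pk then pvEmitFrom value_index f (cnt + 1) pk ks
    else
      (if 2 ≤ cnt ∧ ¬ (pk.1 = none ∨ pk.1 = some "") then
          [(f + 2, f + (cnt : Int) + 1, value_index + 1)] else [])
        ++ pvEmitFrom value_index (f + (cnt : Int)) 1 k ks

-- (key, run length) list of maximal consecutive equal-key runs
def pvGo {α β : Type} [DecidableEq β] (key : α → β) (k : β) (cnt : Nat) : List α → List (β × Nat)
  | [] => [(k, cnt)]
  | y :: ys => if key y = k then pvGo key k (cnt + 1) ys else (k, cnt) :: pvGo key (key y) 1 ys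

-- emit ranges from runs, keeping a running 0-based row index
def pvEmit (value_index : Int) : Int → List ((Option String × Option (Option String)) × Nat) → List (Int × Int × Int)
  | _, [] => []
  | row, (k, n) :: rest =>
    (if 2 ≤ n ∧ ¬ (k.1 = none ∨ k.1 = some "") then
        [(row + 2, row + (n : Int) + 1, value_index + 1)] else [])
      ++ pvEmit value_index (row + (n : Int)) rest

-- A's loop body as a named function (definitionally the lambda inside build_merge_ranges_py)
def pvBodyA (rows : List (List (Option String))) (vi : Int) (gi : Option Int)
    (s : List (Int × Int × Int) × Int × Option String × Option String) (idx : Int) :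
    List (Int × Int × Int) × Int × Option String × Option String :=
  match s with
  | (ranges, start, pv, pg) =>
    let value := if idx < (rows.length : Int) then pvCell rows idx vi else none
    let group : Option String :=
      match gi with
      | some g => if idx < (rows.length : Int) then pvCell rows idx g else none
      | none => none
    if value = pv ∧ (gi = none ∨ group = pg) then (ranges, start, pv, pg)
    else
      let end_row := idx + 1
      let ranges' := if (¬ (pv = none ∨ pv = some "")) ∧ end_row - start > 0 then
          ranges ++ [(start, end_row, vi + 1)] else ranges
      (ranges', idx + 2, value, group)

lemma pv_fold_eq (rows : List (List (Option String))) (vi : Int) (gi : Option Int) :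
    ∀ (tail : List (List (Option String))) (j : Nat) (acc : List (Int × Int × Int))
      (start : Int) (pv pg : Option String),
      rows.drop j = tail → j ≤ rows.length → (gi = none → pg = none) →
      ((PySem.List.pyRange (j : Int) ((rows.length : Int) + 1) 1).foldl
        (pvBodyA rows vi gi) (acc, start, pv, pg)).1
      = ((tail.map (pvKeyB vi gi) ++ [pvSentK gi]).foldl (pvStep vi)
          (acc, start, pvPack gi pv pg, (j : Int))).1 := by
  intro tail
  induction tail with
  | nil =>
    intro j acc start pv pg hdrop hj hpg
    have hj' : rows.length = j := by
      have := List.drop_eq_nil_iff.mp hdrop; omega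
    have hsing : PySem.List.pyRange (j : Int) ((rows.length : Int) + 1) 1 = [(j : Int)] := by
      rw [hj']; exact PySem.List.pyRange_one_singleton _
    rw [hsing]
    simp only [List.map_nil, List.nil_append, List.foldl_cons, List.foldl_nil]
    have hnlt : ¬ ((j : Int) < (rows.length : Int)) := by
      rw [hj']; omega
    cases gi with
    | none =>
      by_cases hv : pv = none <;>
        simp [pvBodyA, pvStep, pvSentK, pvPack, hnlt, hv, eq_comm]
    | some g =>
      by_cases hv : pv = none <;> by_cases hg : pg = none <;>
        simp [pvBodyA, pvStep, pvSentK, pvPack, hnlt, hv, hg, eq_comm]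
  | cons r tl ih =>
    intro j acc start pv pg hdrop hj hpg
    have hjlt : j < rows.length := by
      have := congrArg List.length hdrop
      simp at this; omega
    have hr : rows[j]? = some r := by
      rw [← List.head?_drop, hdrop]; rfl
    have hdrop' : rows.drop (j + 1) = tl := by
      rw [← List.tail_drop, hdrop]; rfl
    rw [PySem.List.pyRange_one_cons (by omega)]
    simp only [List.foldl_cons, List.map_cons, List.cons_append]
    have hcell : ∀ x : Int, pvCell rows (j : Int) x = (PySem.List.pyGet? r x).getD none := by
      intro x
      rw [pvCell, PySem.List.pyGet?_natCast, hr]; rfl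
    have hlt : ((j : Int) < (rows.length : Int)) := by exact_mod_cast hjlt
    cases gi with
    | none =>
      by_cases hv : (PySem.List.pyGet? r vi).getD none = pv
      · rw [show pvBodyA rows vi none (acc, start, pv, pg) (j : Int) = (acc, start, pv, pg) from by
            simp [pvBodyA, hlt, hcell, hv]]
        rw [show pvStep vi (acc, start, pvPack none pv pg, (j : Int)) (pvKeyB vi none r)
              = (acc, start, pvPack none pv pg, (j : Int) + 1) from by
            simp [pvStep, pvKeyB, pvPack, hv]]
        have h := ih (j + 1) acc start pv pg hdrop' (by omega) hpg
        push_cast at h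
        exact h
      · rw [show pvBodyA rows vi none (acc, start, pv, pg) (j : Int)
              = ((if (¬ (pv = none ∨ pv = some "")) ∧ (j : Int) + 1 - start > 0 then
                    acc ++ [(start, (j : Int) + 1, vi + 1)] else acc),
                 (j : Int) + 2, (PySem.List.pyGet? r vi).getD none, none) from by
            simp [pvBodyA, hlt, hcell, hv]]
        rw [show pvStep vi (acc, start, pvPack none pv pg, (j : Int)) (pvKeyB vi none r)
              = ((if (¬ (pv = none ∨ pv = some "")) ∧ (j : Int) + 1 - start > 0 then
                    acc ++ [(start, (j : Int) + 1, vi + 1)] else acc),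
                 (j : Int) + 2, pvKeyB vi none r, (j : Int) + 1) from by
            simp [pvStep, pvKeyB, pvPack, hv]]
        have h := ih (j + 1)
          (if (¬ (pv = none ∨ pv = some "")) ∧ (j : Int) + 1 - start > 0 then
              acc ++ [(start, (j : Int) + 1, vi + 1)] else acc)
          ((j : Int) + 2) ((PySem.List.pyGet? r vi).getD none) none hdrop' (by omega) (fun _ => rfl)
        push_cast at h
        rw [show pvPack none ((PySem.List.pyGet? r vi).getD none) none = pvKeyB vi none r from by
            simp [pvPack, pvKeyB]] at h
        exact h
    | some g =>
      by_cases hv : ((PySem.List.pyGet? r vi).getD none = pv ∧ (PySem.List.pyGet? r g).getD none = pg)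
      · rw [show pvBodyA rows vi (some g) (acc, start, pv, pg) (j : Int) = (acc, start, pv, pg) from by
            simp [pvBodyA, hlt, hcell, hv.1, hv.2]]
        rw [show pvStep vi (acc, start, pvPack (some g) pv pg, (j : Int)) (pvKeyB vi (some g) r)
              = (acc, start, pvPack (some g) pv pg, (j : Int) + 1) from by
            simp [pvStep, pvKeyB, pvPack, hv.1, hv.2]]
        have h := ih (j + 1) acc start pv pg hdrop' (by omega) hpg
        push_cast at h
        exact h
      · rw [show pvBodyA rows vi (some g) (acc, start, pv, pg) (j : Int)
              = ((if (¬ (pv = none ∨ pv = some "")) ∧ (j : Int) + 1 - start > 0 then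
                    acc ++ [(start, (j : Int) + 1, vi + 1)] else acc),
                 (j : Int) + 2, (PySem.List.pyGet? r vi).getD none,
                 (PySem.List.pyGet? r g).getD none) from by
            simp only [pvBodyA, if_pos hlt, hcell]
            rw [if_neg (by rintro ⟨h1, h2 | h2⟩ <;> simp_all)]]
        rw [show pvStep vi (acc, start, pvPack (some g) pv pg, (j : Int)) (pvKeyB vi (some g) r)
              = ((if (¬ (pv = none ∨ pv = some "")) ∧ (j : Int) + 1 - start > 0 then
                    acc ++ [(start, (j : Int) + 1, vi + 1)] else acc),
                 (j : Int) + 2, pvKeyB vi (some g) r, (j : Int) + 1) from by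
            simp only [pvStep, pvKeyB, pvPack]
            rw [if_neg (by simp only [Prod.mk.injEq, Option.map_some, Option.some.injEq]; tauto)]
            rfl]
        have h := ih (j + 1)
          (if (¬ (pv = none ∨ pv = some "")) ∧ (j : Int) + 1 - start > 0 then
              acc ++ [(start, (j : Int) + 1, vi + 1)] else acc)
          ((j : Int) + 2) ((PySem.List.pyGet? r vi).getD none) ((PySem.List.pyGet? r g).getD none)
          hdrop' (by omega) (fun h' => by simp at h')
        push_cast at h
        rw [show pvPack (some g) ((PySem.List.pyGet? r vi).getD none) ((PySem.List.pyGet? r g).getD none)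
              = pvKeyB vi (some g) r from by simp [pvPack, pvKeyB]] at h
        exact h

lemma pv_steps_emit (vi : Int) (gi : Option Int) :
    ∀ (ks : List (Option String × Option (Option String))) (f : Int) (cnt : Nat)
      (pk : Option String × Option (Option String)) (acc : List (Int × Int × Int)),
      1 ≤ cnt →
      ((ks ++ [pvSentK gi]).foldl (pvStep vi) (acc, f + 2, pk, f + (cnt : Int))).1
      = acc ++ pvEmitFrom vi f cnt pk ks := by
  intro ks
  induction ks with
  | nil =>
    intro f cnt pk acc hcnt
    simp only [List.nil_append, List.foldl_cons, List.foldl_nil, pvStep, pvEmitFrom]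
    by_cases h : pvSentK gi = pk
    · have hpk : pk.1 = none := by rw [← h]; rfl
      simp [h, hpk]
    · simp only [if_neg h]
      by_cases hpk : (pk.1 = none ∨ pk.1 = some "")
      · simp [hpk]
      · by_cases hc : 2 ≤ cnt
        · have hgt : f + (cnt : Int) + 1 - (f + 2) > 0 := by omega
          simp [hpk, hgt, hc]
        · have hle : ¬ (f + (cnt : Int) + 1 - (f + 2) > 0) := by omega
          simp [hpk, hle, hc]
  | cons k ks ih =>
    intro f cnt pk acc hcnt
    simp only [List.cons_append, List.foldl_cons]
    by_cases h : k = pk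
    · have hstep : pvStep vi (acc, f + 2, pk, f + (cnt : Int)) k
          = (acc, f + 2, pk, f + ((cnt + 1 : Nat) : Int)) := by
        simp [pvStep, h]
        push_cast
        ring
      rw [hstep, ih f (cnt + 1) pk acc (by omega)]
      simp [pvEmitFrom, h]
    · have hstep : pvStep vi (acc, f + 2, pk, f + (cnt : Int)) k
          = ((if (¬ (pk.1 = none ∨ pk.1 = some "")) ∧ f + (cnt : Int) + 1 - (f + 2) > 0 then
                acc ++ [(f + 2, f + (cnt : Int) + 1, vi + 1)] else acc),
             (f + (cnt : Int)) + 2, k, (f + (cnt : Int)) + ((1 : Nat) : Int)) := by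
        simp [pvStep, h]
      rw [hstep, ih (f + (cnt : Int)) 1 k _ (by omega)]
      rw [pvEmitFrom]
      rw [if_neg h]
      by_cases hpk : (pk.1 = none ∨ pk.1 = some "")
      · simp [hpk]
      · by_cases hc : 2 ≤ cnt
        · have hgt : f + (cnt : Int) + 1 - (f + 2) > 0 := by omega
          simp [hpk, hgt, hc]
        · have hle : ¬ (f + (cnt : Int) + 1 - (f + 2) > 0) := by omega
          simp [hpk, hle, hc]

lemma pv_emitFrom_runs (vi : Int) :
    ∀ (ks : List (Option String × Option (Option String))) (f : Int) (cnt : Nat)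
      (pk : Option String × Option (Option String)),
      pvEmitFrom vi f cnt pk ks = pvEmit vi f (pvGo id pk cnt ks) := by
  intro ks
  induction ks with
  | nil => intro f cnt pk; simp [pvEmitFrom, pvGo, pvEmit]
  | cons k ks ih =>
    intro f cnt pk
    by_cases h : k = pk
    · simp [pvEmitFrom, pvGo, h, ih]
    · simp [pvEmitFrom, pvGo, h, ih, pvEmit]

-- initial prev_group of A
def pvPg0 (rows : List (List (Option String))) (gi : Option Int) : Option String :=
  match gi with
  | some g => pvCell rows 0 g
  | none => none

lemma pv_pack_pg0 (r0 : List (Option String)) (rest : List (List (Option String)))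
    (vi : Int) (gi : Option Int) :
    pvPack gi (pvCell (r0 :: rest) 0 vi) (pvPg0 (r0 :: rest) gi) = pvKeyB vi gi r0 := by
  cases gi <;> simp [pvPack, pvPg0, pvKeyB, pvCell, PySem.List.pyGet?, PySem.List.pyIdx?]

-- ===== bridge from B's breaks-and-pairs form to the run emitter =====

-- run-start indices > 0: i = index of the next element, p = key of the previous element
def pvBreaksAux : Nat → (Option String × Option (Option String)) →
    List (Option String × Option (Option String)) → List Nat
  | _, _, [] => []
  | i, p, k :: ks => if k = p then pvBreaksAux (i + 1) p ks else i :: pvBreaksAux (i + 1) k ks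

-- B's pass 2, abstracted over the key list L and its out-of-range default d
def pvEmitP (vi : Int) (d : Option String × Option (Option String))
    (L : List (Option String × Option (Option String))) (bs : List Nat) : List (Int × Int × Int) :=
  (bs.zip bs.tail).flatMap (fun p =>
    if 2 ≤ p.2 - p.1 ∧ ¬ ((L.getD p.1 d).1 = none ∨ (L.getD p.1 d).1 = some "") then
      [((p.1 : Int) + 2, (p.2 : Int) + 1, vi + 1)] else [])

lemma pvEmitP_cons (vi : Int) (d : Option String × Option (Option String))
    (L : List (Option String × Option (Option String))) (a b : Nat) (t : List Nat) :
    pvEmitP vi d L (a :: b :: t)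
      = (if 2 ≤ b - a ∧ ¬ ((L.getD a d).1 = none ∨ (L.getD a d).1 = some "") then
          [((a : Int) + 2, (b : Int) + 1, vi + 1)] else []) ++ pvEmitP vi d L (b :: t) := by
  simp [pvEmitP]

lemma pv_filter_breaks (d : Option String × Option (Option String)) :
    ∀ (ks : List (Option String × Option (Option String)))
      (p : Option String × Option (Option String)) (off : Nat),
      ((List.range ks.length).filter
        (fun i => decide (ks.getD i d ≠ (p :: ks).getD i d))).map (· + off)
      = pvBreaksAux off p ks := by
  intro ks
  induction ks with
  | nil => intro p off; simp [pvBreaksAux]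
  | cons k ks ih =>
    intro p off
    have hsucc : ((fun i => decide ((k :: ks).getD i d ≠ (p :: k :: ks).getD i d)) ∘ Nat.succ)
        = fun i => decide (ks.getD i d ≠ (k :: ks).getD i d) := by
      funext i; simp
    rw [List.length_cons, List.range_succ_eq_map, List.filter_cons, List.filter_map, hsucc]
    have hmm : ((List.filter (fun i => decide (ks.getD i d ≠ (k :: ks).getD i d))
        (List.range ks.length)).map Nat.succ).map (· + off)
        = pvBreaksAux (off + 1) k ks := by
      rw [List.map_map, ← ih k (off + 1)]
      apply List.map_congr_left
      intro i _
      simp only [Function.comp, Nat.succ_eq_add_one]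
      omega
    by_cases h : k = p
    · rw [if_neg (by simp [h])]
      rw [hmm]
      simp [pvBreaksAux, h]
    · rw [if_pos (by simp [h])]
      rw [List.map_cons, hmm]
      simp [pvBreaksAux, h]

lemma pv_pairs_emit (vi : Int) (d : Option String × Option (Option String))
    (L : List (Option String × Option (Option String))) :
    ∀ (ks : List (Option String × Option (Option String))) (f cnt : Nat)
      (p : Option String × Option (Option String)),
      1 ≤ cnt → f + cnt ≤ L.length → L.drop (f + cnt) = ks → L[f]? = some p →
      pvEmitP vi d L (f :: (pvBreaksAux (f + cnt) p ks ++ [L.length]))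
        = pvEmit vi (f : Int) (pvGo id p cnt ks) := by
  intro ks
  induction ks with
  | nil =>
    intro f cnt p hcnt hle hdrop hget
    have hlen : L.length = f + cnt := by
      have := List.drop_eq_nil_iff.mp hdrop; omega
    have hgetD : L.getD f d = p := by simp [List.getD, hget]
    rw [pvBreaksAux]
    simp only [List.nil_append]
    rw [show pvEmitP vi d L [f, L.length]
        = (if 2 ≤ L.length - f ∧ ¬ ((L.getD f d).1 = none ∨ (L.getD f d).1 = some "") then
            [((f : Int) + 2, (L.length : Int) + 1, vi + 1)] else []) ++ pvEmitP vi d L [L.length] from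
      pvEmitP_cons vi d L f L.length []]
    rw [hgetD]
    have htail : pvEmitP vi d L [L.length] = [] := by simp [pvEmitP]
    rw [htail, List.append_nil]
    rw [pvGo, pvEmit, pvEmit, List.append_nil]
    by_cases hbad : (p.1 = none ∨ p.1 = some "")
    · simp [hbad]
    · by_cases hc : 2 ≤ cnt
      · rw [if_pos ⟨by omega, hbad⟩, if_pos ⟨hc, hbad⟩, hlen]
        push_cast
        ring_nf
      · rw [if_neg (by rintro ⟨hx, -⟩; omega), if_neg (by rintro ⟨hx, -⟩; omega)]
  | cons k ks ih =>
    intro f cnt p hcnt hle hdrop hget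
    have hlt : f + cnt < L.length := by
      have := congrArg List.length hdrop; simp at this; omega
    have hdrop' : L.drop (f + cnt + 1) = ks := by
      rw [← List.tail_drop, hdrop]; rfl
    have hk : L[f + cnt]? = some k := by
      rw [← List.head?_drop, hdrop]; rfl
    rw [pvBreaksAux]
    by_cases h : k = p
    · have harg : f + cnt + 1 = f + (cnt + 1) := by ring
      rw [if_pos h, harg,
        ih f (cnt + 1) p (by omega) (by omega) (by rw [← harg]; exact hdrop') hget]
      simp [pvGo, h]
    · rw [if_neg h]
      simp only [List.cons_append]
      have hgetD : L.getD f d = p := by simp [List.getD, hget]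
      rw [pvEmitP_cons, hgetD]
      rw [ih (f + cnt) 1 k (by omega) (by omega) hdrop' hk]
      have hgo : pvGo id p cnt (k :: ks) = (p, cnt) :: pvGo id k 1 ks := by
        simp [pvGo, h]
      rw [hgo]
      simp only [pvEmit]
      have hsub : f + cnt - f = cnt := by omega
      have ecast : ((f + cnt : Nat) : Int) = (f : Int) + (cnt : Int) := by push_cast; ring
      rw [hsub, ecast]

-- key access of B's port = lookup in the mapped key list (default = key of the empty row)
lemma pv_keyAt_getD (rows : List (List (Option String))) (vi : Int) (gi : Option Int) (i : Nat) :
    pvKeyAt rows vi gi i = (rows.map (pvKeyB vi gi)).getD i (pvKeyB vi gi []) := by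
  cases h : rows[i]? with
  | none =>
    have : rows.length ≤ i := by simpa [List.getElem?_eq_none_iff] using h
    simp [pvKeyAt, List.getD, List.getElem?_map, h, List.getD_eq_getElem?_getD]
  | some r =>
    simp [pvKeyAt, List.getD, List.getElem?_map, h, List.getD_eq_getElem?_getD]

-- B's port, rewritten through the key list L = rows.map key
lemma pv_alt_eq (rows : List (List (Option String))) (vi : Int) (gi : Option Int) :
    build_merge_ranges_py_alt rows vi gi
      = pvEmitP vi (pvKeyB vi gi []) (rows.map (pvKeyB vi gi))
          (((List.range rows.length).filter
              (fun i => i == 0 || decide (pvKeyAt rows vi gi i ≠ pvKeyAt rows vi gi (i - 1))))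
            ++ [rows.length]) := by
  rw [build_merge_ranges_py_alt, pvEmitP]
  congr 1
  funext p
  cases h : rows[p.1]? <;> simp [h, pvKeyB]

-- the filter over range n, for nonempty rows, is 0 :: pvBreaksAux 1 k0 ksL
lemma pv_breaks_eq (rows : List (List (Option String))) (vi : Int) (gi : Option Int)
    (k0 : Option String × Option (Option String))
    (ksL : List (Option String × Option (Option String)))
    (hL : rows.map (pvKeyB vi gi) = k0 :: ksL) :
    (List.range rows.length).filter
        (fun i => i == 0 || decide (pvKeyAt rows vi gi i ≠ pvKeyAt rows vi gi (i - 1)))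
      = 0 :: pvBreaksAux 1 k0 ksL := by
  have hlen : rows.length = ksL.length + 1 := by
    have := congrArg List.length hL; simpa using this
  set d := pvKeyB vi gi [] with hd
  have hKey : ∀ i : Nat, pvKeyAt rows vi gi i = (k0 :: ksL).getD i d := by
    intro i; rw [pv_keyAt_getD, hL]
  rw [hlen, List.range_succ_eq_map, List.filter_cons, List.filter_map]
  have h0 : ((0 : Nat) == 0 || decide (pvKeyAt rows vi gi 0 ≠ pvKeyAt rows vi gi (0 - 1))) = true := by
    simp
  rw [h0]
  simp only [cond_true]
  have hshift : ∀ i ∈ List.range ksL.length,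
      ((fun i => i == 0 || decide (pvKeyAt rows vi gi i ≠ pvKeyAt rows vi gi (i - 1))) ∘ Nat.succ) i
        = decide (ksL.getD i d ≠ (k0 :: ksL).getD i d) := by
    intro i _
    simp only [Function.comp, Nat.succ_eq_add_one]
    rw [hKey (i + 1), hKey (i + 1 - 1)]
    simp
  rw [List.filter_congr hshift]
  have hmap : ((List.range ksL.length).filter
      (fun i => decide (ksL.getD i d ≠ (k0 :: ksL).getD i d))).map Nat.succ
      = ((List.range ksL.length).filter
      (fun i => decide (ksL.getD i d ≠ (k0 :: ksL).getD i d))).map (· + 1) := by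
    apply List.map_congr_left; intro i _; rfl
  rw [hmap, pv_filter_breaks d ksL k0 1]
  simp

-- ===== VERDICT (by name: the statement is the Claim_ definition above) =====
theorem build_merge_ranges_py_spec : Claim_equal_build_merge_ranges_py := by
  intro rows vi gi _ hpre
  obtain ⟨hne, -⟩ := hpre
  match rows with
  | [] => exact absurd rfl hne
  | r0 :: rest =>
    unfold Spec_build_merge_ranges_py
    have h1 := pv_fold_eq (r0 :: rest) vi gi rest 1 [] 2 (pvCell (r0 :: rest) 0 vi)
      (pvPg0 (r0 :: rest) gi) rfl (by simp) (by intro h; cases h; rfl)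
    rw [pv_pack_pg0] at h1
    have h2 := pv_steps_emit vi gi (rest.map (pvKeyB vi gi)) 0 1 (pvKeyB vi gi r0) [] (by norm_num)
    simp only [Nat.cast_one] at h1 h2
    norm_num at h2
    set L := (r0 :: rest).map (pvKeyB vi gi) with hLdef
    have hL : L = pvKeyB vi gi r0 :: rest.map (pvKeyB vi gi) := by simp [hLdef]
    have hE := pv_pairs_emit vi (pvKeyB vi gi []) L (rest.map (pvKeyB vi gi)) 0 1
      (pvKeyB vi gi r0) (by omega) (by simp [hL]) (by simp [hL]) (by simp [hL])
    norm_num at hE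
    have hLen : L.length = (r0 :: rest).length := by simp [hLdef]
    calc build_merge_ranges_py (r0 :: rest) vi gi
        = ((rest.map (pvKeyB vi gi) ++ [pvSentK gi]).foldl (pvStep vi)
            ([], 2, pvKeyB vi gi r0, (1 : Int))).1 := h1
      _ = pvEmitFrom vi 0 1 (pvKeyB vi gi r0) (rest.map (pvKeyB vi gi)) := by
            rw [List.foldl_append]; exact h2
      _ = pvEmit vi 0 (pvGo id (pvKeyB vi gi r0) 1 (rest.map (pvKeyB vi gi))) :=
            pv_emitFrom_runs vi _ 0 1 _
      _ = pvEmitP vi (pvKeyB vi gi []) L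
            ((0 : Nat) :: (pvBreaksAux 1 (pvKeyB vi gi r0) (rest.map (pvKeyB vi gi)) ++ [L.length])) :=
            hE.symm
      _ = build_merge_ranges_py_alt (r0 :: rest) vi gi := by
            rw [pv_alt_eq, pv_breaks_eq (r0 :: rest) vi gi (pvKeyB vi gi r0)
                (rest.map (pvKeyB vi gi)) (hLdef ▸ hL)]
            rw [hLen, hLdef]
            simp
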